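-- pv_equiv track=rewrite | github.com/aotoyae/problem-solving | python/programmers/level.0/prgm_120868_1.py | solution
-- ===== SOURCE A (Python) =====
-- def solution(sides):
--     result = 0
--     min_num = min(sides)
--     max_num = max(sides)
--
--     for i in range(max_num - min_num + 1, max_num + 1):
--         result += 1
--
--     for j in range(max_num + 1, min_num + max_num):
--         result += 1
--
--
--     return result
-- ===== SOURCE B (Python) =====
-- def solution(sides):
--     m = min(sides)
--     return max(m, 0) + max(m - 1, 0)
-- ===== Notes on version B (the rewrite author's own statement) =====
-- stated objective: faster
-- what changed: Replaces the two counting loops over ranges of total length ~2*min-1 with the closed form max(min,0)+max(min-1,0) computed from min(sides) alone.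
import Mathlib
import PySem

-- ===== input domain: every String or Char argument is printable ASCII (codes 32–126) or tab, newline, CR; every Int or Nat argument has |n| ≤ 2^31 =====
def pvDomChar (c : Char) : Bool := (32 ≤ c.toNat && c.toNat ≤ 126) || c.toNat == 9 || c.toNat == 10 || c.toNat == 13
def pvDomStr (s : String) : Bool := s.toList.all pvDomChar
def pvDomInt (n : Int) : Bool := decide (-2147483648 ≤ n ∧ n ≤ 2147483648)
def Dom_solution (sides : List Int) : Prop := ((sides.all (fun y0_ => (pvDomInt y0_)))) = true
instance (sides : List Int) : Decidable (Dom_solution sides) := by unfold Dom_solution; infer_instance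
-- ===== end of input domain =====

-- B replaces A's two counting loops with the closed form max(min,0)+max(min-1,0); faster (asymptotic).

-- ===== PORT A =====
def solution (sides : List Int) : Int :=
  match PySem.List.min? sides (fun x => x), PySem.List.max? sides (fun x => x) with
  | some min_num, some max_num =>
    let result : Int := 0
    let result := (PySem.List.pyRange (max_num - min_num + 1) (max_num + 1) 1).foldl
      (fun acc _ => acc + 1) result
    let result := (PySem.List.pyRange (max_num + 1) (min_num + max_num) 1).foldl
      (fun acc _ => acc + 1) result
    result
  | _, _ => 0  -- unreachable under Pre_ (min/max raise on an empty list)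

-- ===== PORT B =====
def solution_alt (sides : List Int) : Int :=
  match PySem.List.min? sides (fun x => x) with
  | some m => max m 0 + max (m - 1) 0
  | none => 0  -- unreachable under Pre_

-- ===== PRECONDITION & SPEC =====
-- Pre_ excludes only the empty list, on which A's min() raises ValueError.
def Pre_solution (sides : List Int) : Prop := sides ≠ []
instance (sides : List Int) : Decidable (Pre_solution sides) := by unfold Pre_solution; infer_instance
def pvWitness_solution : List Int := [3, 5, 4]

def Spec_solution (sides : List Int) (out : Int) : Prop := out = solution_alt sides
instance (sides : List Int) (out : Int) : Decidable (Spec_solution sides out) := by unfold Spec_solution; infer_instance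

-- ===== CLAIM (what is proved, stated in full; the proofs are below) =====
def Claim_equal_solution : Prop := ∀ (sides : List Int), Dom_solution sides → Pre_solution sides → Spec_solution sides (solution sides)

-- ===== LEMMAS AND PROOFS =====
theorem foldl_count (l : List Int) (init : Int) :
    l.foldl (fun acc _ => acc + 1) init = init + l.length := by
  induction l generalizing init with
  | nil => simp
  | cons x t ih => simp [List.foldl, ih]; omega

-- ===== VERDICT (by name: the statement is the Claim_ definition above) =====
theorem solution_spec : Claim_equal_solution := by
  intro sides _ hpre
  unfold Spec_solution solution solution_alt
  match sides, hpre with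
  | x :: t, _ =>
    rw [PySem.List.min?_id_cons, PySem.List.max?_id_cons]
    simp only [foldl_count, PySem.List.length_pyRange_one]
    omega
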